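-- pv_equiv track=rewrite | github.com/CyJackX/Coding-Exercises | HackerRank/Project Euler/problem-93-arithmetic-expressions-full.py | partition_ordered
-- ===== SOURCE A (Python) =====
-- def partition_ordered(array):
--     if not array:
--         return [[]]
--
--     first = array[0]
--     remaining = array[1:]
--     remaining_partitions = partition_ordered(remaining)
--
--     new_partitions = []
--
--     for rp in remaining_partitions:
--         # 1. Add the current element as a new separate list
--         new_partitions.append([[first]] + rp)
--
--         # 2. Insert the current element at every possible position within each existing subset
--         for i, subset in enumerate(rp):
--             for j in range(len(subset) + 1):
--                 new_subset = subset[:j] + [first] + subset[j:]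
--                 new_partitions.append(rp[:i] + [new_subset] + rp[i+1:])
--
--         # 3. Add a new subset with the current element at every possible position between the existing subsets
--         for i in range(1, len(rp) + 1):
--             new_partitions.append(rp[:i] + [[first]] + rp[i:])
--
--     return new_partitions
-- ===== SOURCE B (Python) =====
-- def partition_ordered(array):
--     # Iterative fold over reversed(array) (seed [[]]) instead of A's head recursion;
--     # each element's three expansions are produced as comprehensions concatenated per partition.
--     partitions = [[]]
--     for first in reversed(array):
--         new_partitions = []
--         for rp in partitions:
--             row = [[[first]] + rp]
--             row += [rp[:i] + [subset[:j] + [first] + subset[j:]] + rp[i + 1:]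
--                     for i, subset in enumerate(rp)
--                     for j in range(len(subset) + 1)]
--             row += [rp[:i] + [[first]] + rp[i:] for i in range(1, len(rp) + 1)]
--             new_partitions += row
--         partitions = new_partitions
--     return partitions
-- ===== Notes on version B (the rewrite author's own statement) =====
-- stated objective: alternative
-- what changed: Replaced the head recursion by an iterative fold over reversed(array) seeded with [[]], and the three per-partition append loops by comprehensions concatenated into each row.
import Mathlib
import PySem

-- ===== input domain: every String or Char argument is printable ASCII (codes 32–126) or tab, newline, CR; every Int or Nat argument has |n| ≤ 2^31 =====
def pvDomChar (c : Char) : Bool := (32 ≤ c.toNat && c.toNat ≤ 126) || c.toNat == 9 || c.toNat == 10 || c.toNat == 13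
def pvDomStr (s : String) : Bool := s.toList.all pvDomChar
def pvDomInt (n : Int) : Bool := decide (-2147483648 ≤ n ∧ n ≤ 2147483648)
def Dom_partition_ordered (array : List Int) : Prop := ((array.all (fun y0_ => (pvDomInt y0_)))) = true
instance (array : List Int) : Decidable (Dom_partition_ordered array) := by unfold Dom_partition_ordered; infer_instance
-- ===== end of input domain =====

-- B replaces A's head recursion by an iterative fold over the reversed list (alternative decomposition; same cost).

-- ===== PORT A =====
-- Slices rp[:i], rp[i+1:], subset[:j], subset[j:] use nonnegative indices only, so
-- List.take/List.drop are exact here; enumerate(rp) is ported via List.zipIdx (indices are ≥ 0).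
def partition_ordered : List Int → List (List (List Int))
  | [] => [[]]
  | first :: remaining =>
    let remaining_partitions := partition_ordered remaining
    remaining_partitions.foldl (fun np rp =>
      -- 1. add [first] as a new separate subset at the front
      let np := np ++ [[[first]] ++ rp]
      -- 2. insert first at every position of every subset
      let np := rp.zipIdx.foldl (fun np si =>
        (List.range (si.1.length + 1)).foldl (fun np j =>
          np ++ [rp.take si.2 ++ [si.1.take j ++ [first] ++ si.1.drop j] ++ rp.drop (si.2 + 1)]) np) np
      -- 3. add [first] as a new subset at every inner position
      (List.range' 1 rp.length).foldl (fun np i =>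
        np ++ [rp.take i ++ [[first]] ++ rp.drop i]) np) []

-- ===== PORT B =====
-- the per-partition "row" of Source B: the three expansions as concatenated comprehensions
def pvRow (first : Int) (rp : List (List Int)) : List (List (List Int)) :=
  ([[first]] ++ rp) ::
    (rp.zipIdx.flatMap (fun si =>
      (List.range (si.1.length + 1)).map (fun j =>
        rp.take si.2 ++ [si.1.take j ++ [first] ++ si.1.drop j] ++ rp.drop (si.2 + 1))))
  ++ (List.range' 1 rp.length).map (fun i => rp.take i ++ [[first]] ++ rp.drop i)

def partition_ordered_alt (array : List Int) : List (List (List Int)) :=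
  array.reverse.foldl (fun partitions first => partitions.flatMap (fun rp => pvRow first rp)) [[]]

-- ===== PRECONDITION & SPEC =====
def Spec_partition_ordered (array : List Int) (out : List (List (List Int))) : Prop := out = partition_ordered_alt array
instance (array : List Int) (out : List (List (List Int))) : Decidable (Spec_partition_ordered array out) := by unfold Spec_partition_ordered; infer_instance

-- ===== CLAIM (what is proved, stated in full; the proofs are below) =====
def Claim_equal_partition_ordered : Prop := ∀ (array : List Int), Dom_partition_ordered array → Spec_partition_ordered array (partition_ordered array)

-- ===== LEMMAS AND PROOFS =====

-- a foldl that appends a chunk per element is a flatMap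
theorem pv_foldl_append_chunks {α β : Type} (h : α → List β) :
    ∀ (l : List α) (acc : List β),
      l.foldl (fun a x => a ++ h x) acc = acc ++ l.flatMap h := by
  intro l
  induction l with
  | nil => intro acc; simp
  | cons x xs ih => intro acc; simp [List.foldl_cons, ih, List.flatMap_cons]

-- a foldl appending singletons is a map
theorem pv_foldl_append_singletons {α β : Type} (f : α → β) :
    ∀ (l : List α) (acc : List β),
      l.foldl (fun a x => a ++ [f x]) acc = acc ++ l.map f := by
  intro l
  induction l with
  | nil => intro acc; simp
  | cons x xs ih => intro acc; simp [List.foldl_cons, ih]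

-- A's per-partition accumulation equals appending B's row
theorem pv_step_eq_row (first : Int) (rp : List (List Int)) (np : List (List (List Int))) :
    ((List.range' 1 rp.length).foldl (fun np i =>
        np ++ [rp.take i ++ [[first]] ++ rp.drop i])
      (rp.zipIdx.foldl (fun np si =>
        (List.range (si.1.length + 1)).foldl (fun np j =>
          np ++ [rp.take si.2 ++ [si.1.take j ++ [first] ++ si.1.drop j] ++ rp.drop (si.2 + 1)]) np)
        (np ++ [[[first]] ++ rp])))
    = np ++ pvRow first rp := by
  have h2 : (rp.zipIdx.foldl (fun np si =>
        (List.range (si.1.length + 1)).foldl (fun np j =>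
          np ++ [rp.take si.2 ++ [si.1.take j ++ [first] ++ si.1.drop j] ++ rp.drop (si.2 + 1)]) np)
        (np ++ [[[first]] ++ rp]))
      = (np ++ [[[first]] ++ rp]) ++ rp.zipIdx.flatMap (fun si =>
          (List.range (si.1.length + 1)).map (fun j =>
            rp.take si.2 ++ [si.1.take j ++ [first] ++ si.1.drop j] ++ rp.drop (si.2 + 1))) := by
    have hf : (fun np (si : List Int × Nat) =>
        (List.range (si.1.length + 1)).foldl (fun np j =>
          np ++ [rp.take si.2 ++ [si.1.take j ++ [first] ++ si.1.drop j] ++ rp.drop (si.2 + 1)]) np)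
      = (fun np si =>
          np ++ (List.range (si.1.length + 1)).map (fun j =>
            rp.take si.2 ++ [si.1.take j ++ [first] ++ si.1.drop j] ++ rp.drop (si.2 + 1))) := by
      funext np si
      exact pv_foldl_append_singletons
        (f := fun j => rp.take si.2 ++ [si.1.take j ++ [first] ++ si.1.drop j] ++ rp.drop (si.2 + 1))
        (List.range (si.1.length + 1)) np
    rw [hf]
    exact pv_foldl_append_chunks _ rp.zipIdx (np ++ [[[first]] ++ rp])
  rw [h2, pv_foldl_append_singletons (f := fun i => rp.take i ++ [[first]] ++ rp.drop i)]
  simp [pvRow]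

-- the cons-step of A is a flatMap of B's rows
theorem pv_cons_step (first : Int) (remaining : List Int) :
    partition_ordered (first :: remaining)
      = (partition_ordered remaining).flatMap (fun rp => pvRow first rp) := by
  show (partition_ordered remaining).foldl _ [] = _
  have hf : (fun np rp =>
      let np := np ++ [[[first]] ++ rp]
      let np := (List.zipIdx rp).foldl (fun np si =>
        (List.range (si.1.length + 1)).foldl (fun np j =>
          np ++ [rp.take si.2 ++ [si.1.take j ++ [first] ++ si.1.drop j] ++ rp.drop (si.2 + 1)]) np) np
      (List.range' 1 rp.length).foldl (fun np i =>
        np ++ [rp.take i ++ [[first]] ++ rp.drop i]) np)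
    = (fun np rp => np ++ pvRow first rp) := by
    funext np rp
    exact pv_step_eq_row first rp np
  rw [hf, pv_foldl_append_chunks (h := fun rp => pvRow first rp) (partition_ordered remaining) []]
  rfl

theorem pv_A_eq_fold (array : List Int) :
    partition_ordered array
      = array.reverse.foldl (fun partitions first => partitions.flatMap (fun rp => pvRow first rp)) [[]] := by
  induction array with
  | nil => rfl
  | cons a t ih =>
    rw [pv_cons_step, ih, List.reverse_cons, List.foldl_append]
    rfl

-- ===== VERDICT (by name: the statement is the Claim_ definition above) =====
theorem partition_ordered_spec : Claim_equal_partition_ordered := by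
  intro array _
  show partition_ordered array = partition_ordered_alt array
  rw [pv_A_eq_fold]
  rfl
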